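-- pv_equiv track=rewrite | github.com/abraia/abraia-multiple | abraia/training.py | load_task
-- ===== SOURCE A (Python) =====
-- def load_task(annotations):
--     label, box, polygon = False, False, False
--     for annotation in annotations:
--         for object in annotation.get('objects', []):
--             if 'polygon' in object:
--                 polygon = True
--             elif 'box' in object:
--                 box = True
--             elif 'label' in object:
--                 label = True
--     if polygon:
--         return 'segment'
--     if box:
--         return 'detect'
--     if label:
--         return 'classify'
-- ===== SOURCE B (Python) =====
-- def load_task(annotations):
--     # Up to three separate passes in precedence order, each with early exit:
--     # no accumulated state, each candidate task re-scans the objects on demand.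
--     def objects():
--         for annotation in annotations:
--             yield from annotation.get('objects', [])
--     for key, name in (('polygon', 'segment'), ('box', 'detect'), ('label', 'classify')):
--         if any(key in obj for obj in objects()):
--             return name
-- ===== Notes on version B (the rewrite author's own statement) =====
-- stated objective: alternative
-- what changed: B drops A's three boolean accumulators and single combined scan: it performs up to three independent staged passes, one per candidate task in precedence order ('polygon'>'box'>'label'), each pass short-circuiting via any() over a fresh generator of the objects and returning immediately on the first hit.
import Mathlib
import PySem

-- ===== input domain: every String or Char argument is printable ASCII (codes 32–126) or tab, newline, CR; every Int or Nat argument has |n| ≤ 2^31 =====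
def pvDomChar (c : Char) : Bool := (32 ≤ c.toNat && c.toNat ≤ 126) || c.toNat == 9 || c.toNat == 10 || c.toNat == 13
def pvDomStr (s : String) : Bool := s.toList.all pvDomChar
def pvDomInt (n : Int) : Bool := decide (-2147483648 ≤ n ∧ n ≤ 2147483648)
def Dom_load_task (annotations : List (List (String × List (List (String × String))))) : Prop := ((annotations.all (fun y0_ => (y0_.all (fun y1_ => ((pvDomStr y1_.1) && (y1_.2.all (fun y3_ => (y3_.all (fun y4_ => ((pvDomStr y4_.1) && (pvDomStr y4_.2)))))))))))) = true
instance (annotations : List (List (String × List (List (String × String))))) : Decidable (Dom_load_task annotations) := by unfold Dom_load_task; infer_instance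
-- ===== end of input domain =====

-- B replaces A's single combined scan with three accumulator booleans by up to three
-- independent staged passes in precedence order, each short-circuiting on the first hit
-- (objective: alternative).

-- ===== PORT A =====
-- state = (label, box, polygon)
def load_task (annotations : List (List (String × List (List (String × String))))) : Option String :=
  let st := annotations.foldl (fun (st : Bool × Bool × Bool) annotation =>
    (PySem.Dict.getD (PySem.Dict.mk annotation) "objects" []).foldl (fun (st : Bool × Bool × Bool) object =>
      if PySem.Dict.contains (PySem.Dict.mk object) "polygon" then (st.1, st.2.1, true)
      else if PySem.Dict.contains (PySem.Dict.mk object) "box" then (st.1, true, st.2.2)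
      else if PySem.Dict.contains (PySem.Dict.mk object) "label" then (true, st.2.1, st.2.2)
      else st) st) (false, false, false)
  if st.2.2 then some "segment"
  else if st.2.1 then some "detect"
  else if st.1 then some "classify"
  else none

-- ===== PORT B =====
-- one pass per precedence entry: any(key in obj for obj in objects())
def findTask : List (String × String) → List (List (String × List (List (String × String)))) → Option String
  | [], _ => none
  | (k, n) :: rest, anns =>
    if anns.any (fun annotation =>
        (PySem.Dict.getD (PySem.Dict.mk annotation) "objects" []).any
          (fun obj => PySem.Dict.contains (PySem.Dict.mk obj) k))
    then some n else findTask rest anns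

def load_task_alt (annotations : List (List (String × List (List (String × String))))) : Option String :=
  findTask [("polygon", "segment"), ("box", "detect"), ("label", "classify")] annotations

-- ===== PRECONDITION & SPEC =====
def Spec_load_task (annotations : List (List (String × List (List (String × String))))) (out : Option String) : Prop := out = load_task_alt annotations
instance (annotations : List (List (String × List (List (String × String))))) (out : Option String) : Decidable (Spec_load_task annotations out) := by unfold Spec_load_task; infer_instance

-- ===== CLAIM (what is proved, stated in full; the proofs are below) =====
def Claim_equal_load_task : Prop := ∀ (annotations : List (List (String × List (List (String × String))))), Dom_load_task annotations → Spec_load_task annotations (load_task annotations)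

-- ===== LEMMAS AND PROOFS =====

def hasK (object : List (String × String)) (k : String) : Bool :=
  PySem.Dict.contains (PySem.Dict.mk object) k

def objsOf (annotation : List (String × List (List (String × String)))) :
    List (List (String × String)) :=
  PySem.Dict.getD (PySem.Dict.mk annotation) "objects" []

def fP (o : List (String × String)) : Bool := hasK o "polygon"
def fB (o : List (String × String)) : Bool := hasK o "box" && !hasK o "polygon"
def fL (o : List (String × String)) : Bool := hasK o "label" && !hasK o "polygon" && !hasK o "box"

theorem inner_A (objs : List (List (String × String))) (st : Bool × Bool × Bool) :
    objs.foldl (fun (st : Bool × Bool × Bool) object =>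
      if PySem.Dict.contains (PySem.Dict.mk object) "polygon" then (st.1, st.2.1, true)
      else if PySem.Dict.contains (PySem.Dict.mk object) "box" then (st.1, true, st.2.2)
      else if PySem.Dict.contains (PySem.Dict.mk object) "label" then (true, st.2.1, st.2.2)
      else st) st
    = (st.1 || objs.any fL, st.2.1 || objs.any fB, st.2.2 || objs.any fP) := by
  induction objs generalizing st with
  | nil => simp
  | cons o rest ih =>
    simp only [List.foldl_cons, List.any_cons, ih]
    cases hp : (o.any fun p => p.1 == "polygon") <;>
      cases hb : (o.any fun p => p.1 == "box") <;>
      cases hl : (o.any fun p => p.1 == "label") <;>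
      simp [fP, fB, fL, hasK, hp, hb, hl]

theorem outer_A (anns : List (List (String × List (List (String × String)))))
    (st : Bool × Bool × Bool) :
    anns.foldl (fun (st : Bool × Bool × Bool) annotation =>
      (PySem.Dict.getD (PySem.Dict.mk annotation) "objects" []).foldl
        (fun (st : Bool × Bool × Bool) object =>
          if PySem.Dict.contains (PySem.Dict.mk object) "polygon" then (st.1, st.2.1, true)
          else if PySem.Dict.contains (PySem.Dict.mk object) "box" then (st.1, true, st.2.2)
          else if PySem.Dict.contains (PySem.Dict.mk object) "label" then (true, st.2.1, st.2.2)
          else st) st) st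
    = (st.1 || (anns.flatMap objsOf).any fL,
       st.2.1 || (anns.flatMap objsOf).any fB,
       st.2.2 || (anns.flatMap objsOf).any fP) := by
  induction anns generalizing st with
  | nil => simp
  | cons a rest ih =>
    simp only [List.foldl_cons]
    rw [inner_A, ih]
    simp [objsOf, Bool.or_assoc]

theorem pass_B (anns : List (List (String × List (List (String × String))))) (k : String) :
    anns.any (fun annotation =>
        (PySem.Dict.getD (PySem.Dict.mk annotation) "objects" []).any
          (fun obj => PySem.Dict.contains (PySem.Dict.mk obj) k))
    = (anns.flatMap objsOf).any (fun o => hasK o k) := by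
  simp [objsOf, hasK]

theorem any_false_forall {α : Type} (L : List α) (p : α → Bool) (h : L.any p = false) :
    ∀ o ∈ L, p o = false := by
  intro o ho
  by_contra hcon
  rw [Bool.not_eq_false] at hcon
  have h2 : L.any p = true := List.any_eq_true.mpr ⟨o, ho, hcon⟩
  rw [h] at h2
  exact Bool.false_ne_true h2

theorem anyB_of_nopoly (L : List (List (String × String)))
    (h : L.any fP = false) : L.any fB = L.any (fun o => hasK o "box") := by
  rw [Bool.eq_iff_iff, List.any_eq_true, List.any_eq_true]
  constructor
  · rintro ⟨o, ho, hfb⟩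
    simp only [fB, Bool.and_eq_true] at hfb
    exact ⟨o, ho, hfb.1⟩
  · rintro ⟨o, ho, hbx⟩
    have hnp := any_false_forall L fP h o ho
    simp only [fP] at hnp
    exact ⟨o, ho, by simp [fB, hbx, hnp]⟩

theorem anyL_of_nopolybox (L : List (List (String × String)))
    (hp : L.any fP = false) (hb : L.any (fun o => hasK o "box") = false) :
    L.any fL = L.any (fun o => hasK o "label") := by
  rw [Bool.eq_iff_iff, List.any_eq_true, List.any_eq_true]
  constructor
  · rintro ⟨o, ho, hfl⟩
    simp only [fL, Bool.and_eq_true] at hfl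
    exact ⟨o, ho, hfl.1.1⟩
  · rintro ⟨o, ho, hlb⟩
    have hnp := any_false_forall L fP hp o ho
    have hnb := any_false_forall L _ hb o ho
    simp only [fP] at hnp
    exact ⟨o, ho, by simp [fL, hlb, hnp, hnb]⟩

-- ===== VERDICT (by name: the statement is the Claim_ definition above) =====
theorem load_task_spec : Claim_equal_load_task := by
  intro anns _
  unfold Spec_load_task
  simp only [load_task, load_task_alt, findTask]
  rw [outer_A]
  rw [pass_B, pass_B, pass_B]
  simp only [Bool.false_or]
  cases hp : (anns.flatMap objsOf).any (fun o => hasK o "polygon") with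
  | true =>
    have h1 : (anns.flatMap objsOf).any fP = true := by
      simpa only [fP] using hp
    simp [h1]
  | false =>
    have h1 : (anns.flatMap objsOf).any fP = false := by
      simpa only [fP] using hp
    simp only [Bool.false_eq_true, if_false]
    cases hb : (anns.flatMap objsOf).any (fun o => hasK o "box") with
    | true =>
      have h2 : (anns.flatMap objsOf).any fB = true := by
        rw [anyB_of_nopoly _ h1]; exact hb
      simp [h1, h2]
    | false =>
      have h2 : (anns.flatMap objsOf).any fB = false := by
        rw [anyB_of_nopoly _ h1]; exact hb
      rw [h2]
      simp only [Bool.false_eq_true, if_false]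
      cases hl : (anns.flatMap objsOf).any (fun o => hasK o "label") with
      | true =>
        have h3 : (anns.flatMap objsOf).any fL = true := by
          rw [anyL_of_nopolybox _ h1 hb]; exact hl
        simp [h1, h3]
      | false =>
        have h3 : (anns.flatMap objsOf).any fL = false := by
          rw [anyL_of_nopolybox _ h1 hb]; exact hl
        simp [h1, h3]
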